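-- pv_equiv track=rewrite | github.com/t-webber/aistrat | src/logic/client_logic.py | visibility_score
-- ===== SOURCE A (Python) =====
-- def visibility_score(carte: list[list[int]], punishment: int = 0):
--     """
--     Permet de donner un score à une carte de visibilité.
--
--     Punishment représente le nombre de points retirés par sur-visibilité qu'on préfèrera sûrement garder à 0
--     (on le veut pas trop grand pour favoriser l'exploration)
--     """
--     score = 0
--     for row in carte:
--         for square in row:
--             if square == 1:
--                 score += 1
--             if square > 1:
--                 score = score + 1 - (square - 1) * punishment
--                 # Ligne arbitraire -> Combien retirer de point par case "sur-visible"
--     return score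
-- ===== SOURCE B (Python) =====
-- def visibility_score(carte: list[list[int]], punishment: int = 0):
--     # Histogram approach: aggregate cells by value once, then score each
--     # distinct value in closed form, weighted by its frequency.
--     freq = {}
--     for row in carte:
--         for sq in row:
--             freq[sq] = freq.get(sq, 0) + 1
--     score = 0
--     for value, n in freq.items():
--         if value >= 1:
--             score += n * (1 - punishment * (value - 1))
--     return score
-- ===== Notes on version B (the rewrite author's own statement) =====
-- stated objective: alternative
-- what changed: Replaced A's cell-by-cell running accumulator with a histogram algorithm: build a frequency dict of all cell values once, then score each distinct value a single time in closed form (n * (1 - punishment * (value - 1)) for values >= 1), weighted by its multiplicity.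
import Mathlib
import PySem

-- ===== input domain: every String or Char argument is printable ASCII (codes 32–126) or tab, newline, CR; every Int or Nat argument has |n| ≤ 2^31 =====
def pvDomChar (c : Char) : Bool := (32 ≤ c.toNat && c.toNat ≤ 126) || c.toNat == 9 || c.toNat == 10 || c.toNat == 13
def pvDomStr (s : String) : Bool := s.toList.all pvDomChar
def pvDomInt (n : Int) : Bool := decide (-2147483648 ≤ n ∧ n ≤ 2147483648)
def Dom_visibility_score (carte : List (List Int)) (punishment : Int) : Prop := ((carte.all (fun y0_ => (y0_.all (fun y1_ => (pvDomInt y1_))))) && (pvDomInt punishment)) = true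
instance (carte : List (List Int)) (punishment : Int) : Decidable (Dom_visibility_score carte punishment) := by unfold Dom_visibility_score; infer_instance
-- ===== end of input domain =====

-- B replaces A's cell-by-cell running accumulator by a frequency histogram of
-- the grid's values, scoring each distinct value once in closed form (objective: alternative).

-- ===== PORT A =====
-- A: nested loops with one running score accumulator.
def visibility_score (carte : List (List Int)) (punishment : Int) : Int :=
  carte.foldl (fun score row =>
    row.foldl (fun score square =>
      let score := if square == 1 then score + 1 else score
      if square > 1 then score + 1 - (square - 1) * punishment else score) score) 0

-- ===== PORT B =====
-- B: build a frequency dict of cell values, then score each distinct value once,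
-- weighted by its multiplicity.
def visibility_score_alt (carte : List (List Int)) (punishment : Int) : Int :=
  let freq : PySem.Dict Int Int :=
    carte.foldl (fun d row =>
      row.foldl (fun d sq => d.insert sq (d.getD sq 0 + 1)) d) PySem.Dict.empty
  freq.items.foldl (fun score p =>
    if p.1 ≥ 1 then score + p.2 * (1 - punishment * (p.1 - 1)) else score) 0

-- ===== PRECONDITION & SPEC =====
def Spec_visibility_score (carte : List (List Int)) (punishment : Int) (out : Int) : Prop := out = visibility_score_alt carte punishment
instance (carte : List (List Int)) (punishment : Int) (out : Int) : Decidable (Spec_visibility_score carte punishment out) := by unfold Spec_visibility_score; infer_instance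

-- ===== CLAIM (what is proved, stated in full; the proofs are below) =====
def Claim_equal_visibility_score : Prop := ∀ (carte : List (List Int)) (punishment : Int), Dom_visibility_score carte punishment → Spec_visibility_score carte punishment (visibility_score carte punishment)

-- ===== LEMMAS AND PROOFS =====

-- per-cell contribution, shared target of both sides
def pvCell (punishment sq : Int) : Int := if sq ≥ 1 then 1 - punishment * (sq - 1) else 0

-- A's inner fold adds the per-cell contributions of the row
theorem pv_inner (punishment : Int) (row : List Int) (s : Int) :
    row.foldl (fun score square =>
      let score := if square == 1 then score + 1 else score
      if square > 1 then score + 1 - (square - 1) * punishment else score) s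
    = s + (row.map (pvCell punishment)).sum := by
  induction row generalizing s with
  | nil => simp
  | cons x xs ih =>
    simp only [List.foldl_cons, List.map_cons, List.sum_cons, ih, pvCell]
    by_cases h1 : x = 1
    · subst h1; simp; ring
    · by_cases h2 : x > 1
      · have hge : x ≥ 1 := by omega
        simp [h1, h2, hge]; ring
      · have hlt : ¬ x ≥ 1 := by omega
        simp [h1, h2, hlt]

-- A equals the sum of per-cell contributions over the flattened grid
theorem pv_A (punishment : Int) (carte : List (List Int)) (s : Int) :
    carte.foldl (fun score row =>
      row.foldl (fun score square =>
        let score := if square == 1 then score + 1 else score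
        if square > 1 then score + 1 - (square - 1) * punishment else score) score) s
    = s + ((carte.flatMap id).map (pvCell punishment)).sum := by
  induction carte generalizing s with
  | nil => simp
  | cons r rs ih => rw [List.foldl_cons, ih, pv_inner]; simp; ring

-- nested insert-fold over the grid is the insert-fold over the flattened cells
theorem pv_freq_flat (carte : List (List Int)) (d : PySem.Dict Int Int) :
    carte.foldl (fun d row =>
      row.foldl (fun d sq => d.insert sq (d.getD sq 0 + 1)) d) d
    = (carte.flatMap id).foldl (fun d sq => d.insert sq (d.getD sq 0 + 1)) d := by
  induction carte generalizing d with
  | nil => simp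
  | cons r rs ih => simp [List.foldl_append, ih]

-- summing an indicator of a single element over a nodup list picks out its value
theorem pv_sum_single (f : Int → Int) (x : Int) :
    ∀ (d : List Int), d.Nodup → x ∈ d →
      (d.map (fun k => if k = x then f k else 0)).sum = f x := by
  intro d
  induction d with
  | nil => intro _ hx; cases hx
  | cons a t ih =>
    intro hd hx
    rcases List.mem_cons.mp hx with h | h
    · subst h
      have hz : ∀ k ∈ t, (if k = x then f k else 0) = 0 := by
        intro k hk
        have : k ≠ x := fun he => (List.nodup_cons.mp hd).1 (he ▸ hk)
        simp [this]
      simp [List.map_congr_left hz]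
    · have hne : a ≠ x := fun he => (List.nodup_cons.mp hd).1 (he ▸ h)
      simp [hne, ih (List.nodup_cons.mp hd).2 h]

-- summing count · f over the distinct values equals summing f over all cells
theorem pv_count_sum (xs : List Int) (f : Int → Int) :
    ((PySem.Set.ofList xs).map (fun k => ((xs.count k : Int)) * f k)).sum
      = (xs.map f).sum := by
  have key : ∀ (l : List Int), (∀ y ∈ l, y ∈ PySem.Set.ofList xs) →
      ((PySem.Set.ofList xs).map (fun k => ((l.count k : Int)) * f k)).sum = (l.map f).sum := by
    intro l
    induction l with
    | nil => simp
    | cons x l ih =>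
      intro hsub
      have hx : x ∈ PySem.Set.ofList xs := hsub x (List.mem_cons_self)
      have hsub' : ∀ y ∈ l, y ∈ PySem.Set.ofList xs := fun y hy => hsub y (List.mem_cons_of_mem _ hy)
      have split : ∀ k : Int, (((x :: l).count k : Int)) * f k
          = ((l.count k : Int)) * f k + (if k = x then f k else 0) := by
        intro k
        by_cases h : k = x
        · subst h; simp [List.count_cons_self]; ring
        · simp only [List.count_cons, h, if_false]
          simp
          exact Or.inl (fun he => h he.symm)
      calc ((PySem.Set.ofList xs).map (fun k => (((x :: l).count k : Int)) * f k)).sum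
          = ((PySem.Set.ofList xs).map (fun k => ((l.count k : Int)) * f k + (if k = x then f k else 0))).sum := by
            exact congrArg List.sum (List.map_congr_left (fun k _ => split k))
        _ = ((PySem.Set.ofList xs).map (fun k => ((l.count k : Int)) * f k)).sum
              + ((PySem.Set.ofList xs).map (fun k => if k = x then f k else 0)).sum := by
            rw [← List.sum_map_add]
        _ = (l.map f).sum + f x := by
            rw [ih hsub', pv_sum_single f x _ (PySem.Set.nodup_ofList xs) hx]
        _ = ((x :: l).map f).sum := by simp; ring
  exact key xs (fun y hy => (PySem.Set.mem_ofList xs y).mpr hy)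

-- ===== VERDICT (by name: the statement is the Claim_ definition above) =====
theorem visibility_score_spec : Claim_equal_visibility_score := by
  intro carte punishment _
  unfold Spec_visibility_score visibility_score visibility_score_alt
  rw [pv_A, pv_freq_flat, PySem.Dict.foldl_insert_getD_add_one_eq_counter]
  simp only [PySem.Dict.items_counter]
  set cells := carte.flatMap id with hc
  have hfold : ∀ (l : List (Int × Int)) (s : Int),
      l.foldl (fun score p =>
        if p.1 ≥ 1 then score + p.2 * (1 - punishment * (p.1 - 1)) else score) s
      = s + (l.map (fun p => if p.1 ≥ 1 then p.2 * (1 - punishment * (p.1 - 1)) else 0)).sum := by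
    intro l
    induction l with
    | nil => simp
    | cons p l ih =>
      intro s
      by_cases h : p.1 ≥ 1
      · simp [h, ih]; ring
      · simp [h, ih]
  rw [hfold]
  have : ((PySem.Set.ofList cells).map
      ((fun p : Int × Int => if p.1 ≥ 1 then p.2 * (1 - punishment * (p.1 - 1)) else 0) ∘
        (fun k => (k, (cells.count k : Int))))).sum
      = ((PySem.Set.ofList cells).map (fun k => ((cells.count k : Int)) * pvCell punishment k)).sum := by
    apply congrArg List.sum
    apply List.map_congr_left
    intro k _
    by_cases h : k ≥ 1 <;> simp [pvCell, h]
  rw [List.map_map, this, pv_count_sum]
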